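-- pv_equiv track=rewrite | github.com/takasan-aruism/ESDE-Research | cognition/semantic_injection/cognition_v32.py | assign_regions
-- ===== SOURCE A (Python) =====
-- import csv, json, time, argparse, math
--
-- GRID_ROWS = 2
--
-- GRID_COLS = 2
--
-- def assign_regions(N, rows=GRID_ROWS, cols=GRID_COLS):
--     side = int(math.ceil(math.sqrt(N)))
--     region_map = {}
--     for i in range(N):
--         r = i // side
--         c = i % side
--         rr = min(r * rows // side, rows - 1)
--         rc = min(c * cols // side, cols - 1)
--         region_map[i] = rr * cols + rc
--     return region_map
-- ===== SOURCE B (Python) =====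
-- import math
--
-- GRID_ROWS = 2
-- GRID_COLS = 2
--
-- def assign_regions(N, rows=GRID_ROWS, cols=GRID_COLS):
--     side = int(math.ceil(math.sqrt(N)))
--     row_base = [min(r * rows // side, rows - 1) * cols for r in range(side)]
--     col_band = [min(c * cols // side, cols - 1) for c in range(side)]
--     flat = [rb + cb for rb in row_base for cb in col_band]
--     return dict(enumerate(flat[:N]))
-- ===== Notes on version B (the rewrite author's own statement) =====
-- stated objective: alternative
-- what changed: Replaces the per-index div/mod/min computation inside the loop by two precomputed band-lookup tables whose cartesian product, truncated to N entries, is enumerated into the dict.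
import Mathlib
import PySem

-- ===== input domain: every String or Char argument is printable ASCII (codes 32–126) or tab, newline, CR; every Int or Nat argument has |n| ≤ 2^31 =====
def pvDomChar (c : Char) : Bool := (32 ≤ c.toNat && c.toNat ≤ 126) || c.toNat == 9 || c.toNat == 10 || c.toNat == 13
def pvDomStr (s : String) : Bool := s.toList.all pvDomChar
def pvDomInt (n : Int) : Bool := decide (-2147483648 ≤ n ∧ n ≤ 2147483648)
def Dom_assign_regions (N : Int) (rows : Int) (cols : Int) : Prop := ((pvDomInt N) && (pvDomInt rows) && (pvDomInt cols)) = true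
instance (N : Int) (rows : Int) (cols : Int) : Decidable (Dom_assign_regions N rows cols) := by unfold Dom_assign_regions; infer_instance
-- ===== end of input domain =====

-- B replaces A's per-index div/mod arithmetic by two precomputed band-lookup tables whose
-- cartesian product, truncated to N entries, is enumerated into the dict.


-- ===== PORT A =====
-- int(math.ceil(math.sqrt(N))): exact integer ceiling square root for 0 ≤ N ≤ 2^31
-- (double sqrt is correctly rounded, so on this range the float computation equals the integer one).
def pyCeilSqrt (N : Int) : Int :=
  let n := N.toNat
  let k := Nat.sqrt n
  ((if k * k = n then k else k + 1 : Nat) : Int)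

def assign_regions (N : Int) (rows : Int) (cols : Int) : List (Int × Int) :=
  let side := pyCeilSqrt N
  ((PySem.List.pyRange 0 N 1).foldl
    (fun (d : PySem.Dict Int Int) i =>
      let r := PySem.Int.floordiv i side
      let c := PySem.Int.mod i side
      let rr := min (PySem.Int.floordiv (r * rows) side) (rows - 1)
      let rc := min (PySem.Int.floordiv (c * cols) side) (cols - 1)
      d.insert i (rr * cols + rc))
    PySem.Dict.empty).items

-- ===== PORT B =====
def assign_regions_alt (N : Int) (rows : Int) (cols : Int) : List (Int × Int) :=
  let side := pyCeilSqrt N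
  let row_base := (PySem.List.pyRange 0 side 1).map
    (fun r => min (PySem.Int.floordiv (r * rows) side) (rows - 1) * cols)
  let col_band := (PySem.List.pyRange 0 side 1).map
    (fun c => min (PySem.Int.floordiv (c * cols) side) (cols - 1))
  let flat := row_base.flatMap (fun rb => col_band.map (fun cb => rb + cb))
  (PySem.Dict.ofList (PySem.List.enumerate (PySem.List.slice flat none (some N)) 0)).items


-- ===== PRECONDITION & SPEC =====
-- Pre_ excludes only N < 0, where math.sqrt(N) raises ValueError in A (and likewise in B).
def Pre_assign_regions (N : Int) (rows : Int) (cols : Int) : Prop := 0 ≤ N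
instance (N : Int) (rows : Int) (cols : Int) : Decidable (Pre_assign_regions N rows cols) := by unfold Pre_assign_regions; infer_instance
def pvWitness_assign_regions : Int × Int × Int := (5, 2, 2)

def Spec_assign_regions (N : Int) (rows : Int) (cols : Int) (out : List (Int × Int)) : Prop := out = assign_regions_alt N rows cols
instance (N : Int) (rows : Int) (cols : Int) (out : List (Int × Int)) : Decidable (Spec_assign_regions N rows cols out) := by unfold Spec_assign_regions; infer_instance

-- ===== CLAIM (what is proved, stated in full; the proofs are below) =====
def Claim_equal_assign_regions : Prop := ∀ (N : Int) (rows : Int) (cols : Int), Dom_assign_regions N rows cols → Pre_assign_regions N rows cols → Spec_assign_regions N rows cols (assign_regions N rows cols)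

-- ===== LEMMAS AND PROOFS =====
def pvCsq (n : Nat) : Nat := if Nat.sqrt n * Nat.sqrt n = n then Nat.sqrt n else Nat.sqrt n + 1

lemma pyCeilSqrt_eq (N : Int) : pyCeilSqrt N = ((pvCsq N.toNat : Nat) : Int) := rfl

lemma le_csq_mul (n : Nat) : n ≤ pvCsq n * pvCsq n := by
  unfold pvCsq; split_ifs with h
  · omega
  · exact le_of_lt (by simpa [Nat.succ_eq_add_one] using Nat.lt_succ_sqrt n)

lemma csq_pos (n : Nat) (h : 0 < n) : 0 < pvCsq n := by
  unfold pvCsq; split_ifs with hh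
  · rcases Nat.eq_zero_or_pos (Nat.sqrt n) with h0 | h0
    · rw [h0] at hh; omega
    · exact h0
  · omega

def pvF (side rows cols : Int) (i : Int) : Int :=
  min (PySem.Int.floordiv (PySem.Int.floordiv i side * rows) side) (rows - 1) * cols +
  min (PySem.Int.floordiv (PySem.Int.mod i side * cols) side) (cols - 1)

def pvRowBase (N rows cols : Int) : List Int :=
  (PySem.List.pyRange 0 (pyCeilSqrt N) 1).map
    (fun r => min (PySem.Int.floordiv (r * rows) (pyCeilSqrt N)) (rows - 1) * cols)

def pvColBand (N cols : Int) : List Int :=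
  (PySem.List.pyRange 0 (pyCeilSqrt N) 1).map
    (fun c => min (PySem.Int.floordiv (c * cols) (pyCeilSqrt N)) (cols - 1))

def pvFlat (N rows cols : Int) : List Int :=
  (pvRowBase N rows cols).flatMap (fun rb => (pvColBand N cols).map (fun cb => rb + cb))

lemma A_canon (N rows cols : Int) :
    assign_regions N rows cols
      = (PySem.List.pyRange 0 N 1).map (fun i => (i, pvF (pyCeilSqrt N) rows cols i)) := by
  unfold assign_regions
  have h := PySem.Dict.items_foldl_insert_fresh (PySem.List.pyRange 0 N 1)
      (fun i => i) (fun i => pvF (pyCeilSqrt N) rows cols i) PySem.Dict.empty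
      (by intro a _; simp [PySem.Dict.contains_empty])
      (by simpa using PySem.List.nodup_pyRange_one 0 N)
  simpa [pvF] using h

lemma items_ofList_of_nodup_fst {κ ν : Type} [BEq κ] [LawfulBEq κ] (l : List (κ × ν))
    (h : (l.map Prod.fst).Nodup) : (PySem.Dict.ofList l).items = l := by
  have h2 := PySem.Dict.items_foldl_insert_fresh l Prod.fst Prod.snd PySem.Dict.empty
      (by intro a _; simp [PySem.Dict.contains_empty]) h
  simpa [PySem.Dict.ofList, PySem.Dict.update] using h2

lemma flat_length (g : Int → Int → Int) (b : List Int) :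
    ∀ a : List Int, (a.flatMap fun u => b.map (g u)).length = a.length * b.length := by
  intro a; induction a with
  | nil => simp
  | cons u a ih => simp [List.flatMap_cons, ih, Nat.succ_mul, Nat.add_comm]

lemma flat_getElem? (g : Int → Int → Int) (b : List Int) (hb : 0 < b.length) :
    ∀ (a : List Int) (j : Nat), j < a.length * b.length →
      (a.flatMap fun u => b.map (g u))[j]? =
        some (g ((a[j / b.length]?).getD 0) ((b[j % b.length]?).getD 0)) := by
  intro a; induction a with
  | nil => intro j hj; simp at hj
  | cons u a ih =>
    intro j hj
    rw [List.flatMap_cons, List.getElem?_append]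
    by_cases h1 : j < b.length
    · rw [if_pos (by simpa using h1)]
      rw [Nat.div_eq_of_lt h1, Nat.mod_eq_of_lt h1]
      simp [List.getElem?_eq_getElem h1]
    · rw [if_neg (by simpa using h1)]
      have hj' : j - b.length < a.length * b.length := by
        have : (u :: a).length * b.length = a.length * b.length + b.length := by
          simp [Nat.succ_mul]
        omega
      rw [List.length_map, ih (j - b.length) hj']
      have hdiv : j / b.length = (j - b.length) / b.length + 1 := by
        conv_lhs => rw [show j = (j - b.length) + b.length by omega]
        rw [Nat.add_div_right _ hb]
      have hmod : j % b.length = (j - b.length) % b.length := by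
        conv_lhs => rw [show j = (j - b.length) + b.length by omega]
        rw [Nat.add_mod_right]
      rw [hdiv, hmod, List.getElem?_cons_succ]

lemma pvFlat_length (N rows cols : Int) :
    (pvFlat N rows cols).length = (pyCeilSqrt N).toNat * (pyCeilSqrt N).toNat := by
  rw [pvFlat, flat_length]
  simp [pvRowBase, pvColBand, PySem.List.length_pyRange_one]

-- ===== VERDICT (by name: the statement is the Claim_ definition above) =====
theorem assign_regions_spec : Claim_equal_assign_regions := by
  intro N rows cols _ hpre
  unfold Pre_assign_regions at hpre
  unfold Spec_assign_regions
  rw [A_canon]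
  have hle : N.toNat ≤ (pyCeilSqrt N).toNat * (pyCeilSqrt N).toNat := by
    have := le_csq_mul N.toNat
    simpa [pyCeilSqrt_eq] using this
  have htake : (List.take N.toNat (pvFlat N rows cols)).length = N.toNat := by
    rw [List.length_take, pvFlat_length]; omega
  have hB : assign_regions_alt N rows cols
      = (PySem.Dict.ofList
          (PySem.List.enumerate (PySem.List.slice (pvFlat N rows cols) none (some N)) 0)).items := rfl
  rw [hB, PySem.List.slice_to _ hpre]
  rw [items_ofList_of_nodup_fst _ (by
        rw [show (Prod.fst : Int × Int → Int) = (fun p : Int × Int => p.1) from rfl,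
            PySem.List.map_fst_enumerate]
        exact PySem.List.nodup_pyRange_one _ _)]
  rw [PySem.List.enumerate_eq_map_pyRange _ 0]
  have hlen2 : PySem.List.len (List.take N.toNat (pvFlat N rows cols)) = N := by
    simp only [PySem.List.len, htake]; omega
  rw [hlen2]
  apply List.map_congr_left
  intro i hi
  rw [PySem.List.mem_pyRange_one] at hi
  obtain ⟨hi0, hiN⟩ := hi
  have hjn : i.toNat < N.toNat := by omega
  have hspos : 0 < (pyCeilSqrt N).toNat := by
    have := csq_pos N.toNat (by omega)
    simpa [pyCeilSqrt_eq] using this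
  have hicast : ((i.toNat : Nat) : Int) = i := Int.toNat_of_nonneg hi0
  have hscast : (((pyCeilSqrt N).toNat : Nat) : Int) = pyCeilSqrt N := by
    rw [pyCeilSqrt_eq]; simp
  congr 1
  rw [PySem.List.pyGetD_eq_getElem _ _ hi0 (by rw [htake]; omega)]
  rw [List.getElem_take]
  have hget : (pvFlat N rows cols)[i.toNat]'(by rw [pvFlat_length]; omega) =
      ((pvFlat N rows cols)[i.toNat]?).getD 0 := by
    rw [List.getElem?_eq_getElem (by rw [pvFlat_length]; omega)]; rfl
  rw [hget]
  rw [show pvFlat N rows cols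
        = (pvRowBase N rows cols).flatMap (fun rb => (pvColBand N cols).map (fun cb => rb + cb)) from rfl]
  have hrbl : (pvRowBase N rows cols).length = (pyCeilSqrt N).toNat := by
    simp [pvRowBase, PySem.List.length_pyRange_one]
  have hcbl : (pvColBand N cols).length = (pyCeilSqrt N).toNat := by
    simp [pvColBand, PySem.List.length_pyRange_one]
  rw [flat_getElem? _ _ (by omega) _ _ (by rw [hrbl, hcbl]; omega)]
  rw [hcbl]
  have hrange : PySem.List.pyRange 0 (pyCeilSqrt N) 1
      = (List.range (pyCeilSqrt N).toNat).map (fun k => ((k : Nat) : Int)) := by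
    rw [PySem.List.pyRange_one]
    simp
  have hdivlt : i.toNat / (pyCeilSqrt N).toNat < (pyCeilSqrt N).toNat := by
    rw [Nat.div_lt_iff_lt_mul hspos]; omega
  have hmodlt : i.toNat % (pyCeilSqrt N).toNat < (pyCeilSqrt N).toNat := Nat.mod_lt _ hspos
  rw [pvRowBase, pvColBand, hrange, List.getElem?_map, List.getElem?_map,
      List.getElem?_map, List.getElem?_map,
      List.getElem?_range hdivlt, List.getElem?_range hmodlt]
  simp only [Option.map_some, Option.getD_some]
  unfold pvF
  have h1 : PySem.Int.floordiv i (pyCeilSqrt N)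
      = ((i.toNat / (pyCeilSqrt N).toNat : Nat) : Int) := by
    rw [← hicast, ← hscast]; exact PySem.Int.floordiv_natCast _ _
  have h2 : PySem.Int.mod i (pyCeilSqrt N)
      = ((i.toNat % (pyCeilSqrt N).toNat : Nat) : Int) := by
    rw [← hicast, ← hscast]; exact PySem.Int.mod_natCast _ _
  rw [h1, h2]
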